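-- pv_equiv track=rewrite | github.com/cpphey/cpp | firstproject/test2.py | solution
-- ===== SOURCE A (Python) =====
-- def distance(arg1,arg2):
--     #assuming arg2 is bigger than arg1
--     return arg2-arg1
--
-- def solution(A):
--     # write your code in Python 3.6
--     max=-100 #init
--     sizeA = len(A)
--     for i in range(0,sizeA):
--         for j in range(i,sizeA):#no going from i is right because problem said a node to itself will have distance 0; see below
--             sum = A[i]+A[j]+distance(i,j)
--             if(max<sum):
--                 max=sum
--     return max
--     pass
-- ===== SOURCE B (Python) =====
-- def solution(A):
--     # One pass: track the running max of A[i]-i, combine with A[j]+j at each j.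
--     res = -100
--     best = None
--     for j, x in enumerate(A):
--         cand = x - j
--         if best is None or cand > best:
--             best = cand
--         s = best + x + j
--         if s > res:
--             res = s
--     return res
-- ===== Notes on version B (the rewrite author's own statement) =====
-- stated objective: faster
-- what changed: Replaces the quadratic double loop over all pairs i<=j with a single pass that keeps the running maximum of A[i]-i and combines it with A[j]+j at each j (keeping A's -100 floor as the initial value).
import Mathlib
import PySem

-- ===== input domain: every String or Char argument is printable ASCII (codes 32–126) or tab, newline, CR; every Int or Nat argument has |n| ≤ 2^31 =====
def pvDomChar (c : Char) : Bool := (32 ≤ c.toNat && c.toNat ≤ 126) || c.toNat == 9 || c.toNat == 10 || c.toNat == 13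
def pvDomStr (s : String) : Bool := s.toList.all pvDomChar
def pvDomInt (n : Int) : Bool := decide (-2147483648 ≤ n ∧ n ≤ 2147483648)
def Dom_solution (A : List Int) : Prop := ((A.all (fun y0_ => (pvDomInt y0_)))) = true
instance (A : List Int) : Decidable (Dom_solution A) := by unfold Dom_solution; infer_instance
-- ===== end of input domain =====

-- B replaces A's double loop over all pairs i ≤ j with one left-to-right pass keeping the
-- running maximum of A[i]-i and combining it with A[j]+j (objective: faster; A's -100
-- initial value is kept).

-- ===== PORT A =====
def distancePort (arg1 arg2 : Int) : Int := arg2 - arg1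

def solution (A : List Int) : Int :=
  let sizeA : Int := PySem.List.len A
  (PySem.List.pyRange 0 sizeA 1).foldl (fun mx i =>
    (PySem.List.pyRange i sizeA 1).foldl (fun mx j =>
      let sum := PySem.List.pyGetD A i 0 + PySem.List.pyGetD A j 0 + distancePort i j
      if mx < sum then sum else mx) mx) (-100)

-- ===== PORT B =====
def solution_alt (A : List Int) : Int :=
  ((PySem.List.enumerate A).foldl (fun (st : Int × Option Int) (p : Int × Int) =>
      let cand := p.2 - p.1
      let best' := match st.2 with
        | none => cand
        | some b => if cand > b then cand else b
      let s := best' + p.2 + p.1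
      (if s > st.1 then s else st.1, some best'))
    (-100, none)).1

-- ===== PRECONDITION & SPEC =====
def Spec_solution (A : List Int) (out : Int) : Prop := out = solution_alt A
instance (A : List Int) (out : Int) : Decidable (Spec_solution A out) := by unfold Spec_solution; infer_instance

-- ===== CLAIM (what is proved, stated in full; the proofs are below) =====
def Claim_equal_solution : Prop := ∀ (A : List Int), Dom_solution A → Spec_solution A (solution A)

-- ===== LEMMAS AND PROOFS =====

/-- `A[k]` at the in-range indices both loops use. -/
def pvG (A : List Int) (k : Nat) : Int := A.getD k 0

/-- The pair score `A[i] + A[j] + (j - i)`. -/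
def pvS (A : List Int) (p : Nat × Nat) : Int := pvG A p.1 + pvG A p.2 + ((p.2 : Int) - (p.1 : Int))

/-- A's accumulator step, as a max. -/
def pvF (A : List Int) (m : Int) (p : Nat × Nat) : Int := max m (pvS A p)

/-- The pairs i ≤ j < n in A's traversal order (grouped by i). -/
def pairsI (n : Nat) : List (Nat × Nat) :=
  (List.range n).flatMap (fun i => (List.range (n - i)).map (fun k => (i, i + k)))

/-- The same pairs grouped by j (B's traversal order). -/
def pairsJ (n : Nat) : List (Nat × Nat) :=
  (List.range n).flatMap (fun j => (List.range (j + 1)).map (fun i => (i, j)))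

def pvM (A : List Int) (n : Nat) : Int := (pairsJ n).foldl (pvF A) (-100)

/-- Running maximum of `A[i] - i` over `i < n` (meaningful for `1 ≤ n`). -/
def pvB (A : List Int) (n : Nat) : Int :=
  ((List.range n).map (fun i => pvG A i - (i : Int))).foldl max (pvG A 0 - 0)

/-- B's loop body over the natural index. -/
def pvPhi (A : List Int) (st : Int × Option Int) (k : Nat) : Int × Option Int :=
  let cand := pvG A k - (k : Int)
  let best' := match st.2 with
    | none => cand
    | some b => if cand > b then cand else b
  let s := best' + pvG A k + (k : Int)
  (if s > st.1 then s else st.1, some best')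

theorem if_lt_eq_max (a b : Int) : (if a < b then b else a) = max a b := by
  rw [Int.max_def]; split_ifs <;> omega

theorem A_eq_pairsI (A : List Int) :
    solution A = (pairsI A.length).foldl (pvF A) (-100) := by
  simp only [solution]
  rw [PySem.List.pyRange_one 0, List.foldl_map]
  rw [pairsI, List.foldl_flatMap]
  have hl : ((PySem.List.len A) - 0).toNat = A.length := by simp [PySem.List.len]
  rw [hl]
  refine congrArg (fun f => List.foldl f (-100 : Int) (List.range A.length)) ?_
  funext mx k
  rw [PySem.List.pyRange_one, List.foldl_map, List.foldl_map]
  have hl2 : ((PySem.List.len A) - (0 + (k : Int))).toNat = A.length - k := by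
    simp [PySem.List.len]
  rw [hl2]
  refine congrArg (fun f => List.foldl f mx (List.range (A.length - k))) ?_
  funext acc k2
  simp only [distancePort, pvF, pvS, pvG, zero_add, PySem.List.pyGetD_natCast,
    ← Nat.cast_add, PySem.List.pyGetD_natCast]
  rw [if_lt_eq_max]

theorem mem_pairsI (n : Nat) (a : Nat × Nat) : a ∈ pairsI n ↔ a.1 ≤ a.2 ∧ a.2 < n := by
  simp only [pairsI, List.mem_flatMap, List.mem_range, List.mem_map]
  constructor
  · rintro ⟨i, hi, k, hk, rfl⟩; simp; omega
  · rintro ⟨h1, h2⟩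
    exact ⟨a.1, by omega, a.2 - a.1, by omega, by simp [Nat.add_sub_cancel' h1]⟩

theorem mem_pairsJ (n : Nat) (a : Nat × Nat) : a ∈ pairsJ n ↔ a.1 ≤ a.2 ∧ a.2 < n := by
  simp only [pairsJ, List.mem_flatMap, List.mem_range, List.mem_map]
  constructor
  · rintro ⟨j, hj, i, hi, rfl⟩; simp; omega
  · rintro ⟨h1, h2⟩
    exact ⟨a.2, by omega, a.1, by omega, by simp⟩

theorem nodup_pairsI (n : Nat) : (pairsI n).Nodup := by
  rw [pairsI, List.nodup_flatMap]
  refine ⟨fun i _ => List.Nodup.map ?_ List.nodup_range, ?_⟩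
  · intro x y h; simpa using h
  · refine List.Pairwise.imp ?_ (List.pairwise_lt_range (n := n))
    intro i j hij p hp hq
    simp only [List.mem_map] at hp hq
    obtain ⟨k1, _, rfl⟩ := hp
    obtain ⟨k2, _, h2⟩ := hq
    exact absurd (congrArg Prod.fst h2.symm) (by simp; omega)

theorem nodup_pairsJ (n : Nat) : (pairsJ n).Nodup := by
  rw [pairsJ, List.nodup_flatMap]
  refine ⟨fun j _ => List.Nodup.map ?_ List.nodup_range, ?_⟩
  · intro x y h; simpa using h
  · refine List.Pairwise.imp ?_ (List.pairwise_lt_range (n := n))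
    intro i j hij p hp hq
    simp only [List.mem_map] at hp hq
    obtain ⟨k1, _, rfl⟩ := hp
    obtain ⟨k2, _, h2⟩ := hq
    exact absurd (congrArg Prod.snd h2.symm) (by simp; omega)

theorem pairsI_perm_pairsJ (n : Nat) : (pairsI n).Perm (pairsJ n) := by
  rw [List.perm_ext_iff_of_nodup (nodup_pairsI n) (nodup_pairsJ n)]
  intro a; rw [mem_pairsI, mem_pairsJ]

theorem A_eq_pvM (A : List Int) : solution A = pvM A A.length := by
  rw [A_eq_pairsI]
  exact (pairsI_perm_pairsJ A.length).foldl_eq'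
    (fun x _ y _ z => by simp only [pvF]; rw [max_right_comm]) (-100)

theorem foldl_max_add (l : List Int) (b c : Int) :
    (l.map (· + c)).foldl max (b + c) = l.foldl max b + c := by
  induction l generalizing b with
  | nil => rfl
  | cons x t ih => rw [List.map_cons, List.foldl_cons, List.foldl_cons, max_add_add_right, ih]

theorem column_fold (h : Nat → Int) (c m : Int) (k : Nat) :
    (List.range (k + 1)).foldl (fun m i => max m (h i + c)) m
      = max m (((List.range (k + 1)).map h).foldl max (h 0) + c) := by
  have e1 : (List.range (k + 1)).foldl (fun m i => max m (h i + c)) m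
      = ((List.range (k + 1)).map (fun i => h i + c)).foldl max m := by
    rw [List.foldl_map]
  have e2 : (List.range (k + 1)).map (fun i => h i + c)
      = ((List.range (k + 1)).map h).map (· + c) := by simp [List.map_map, Function.comp]
  have e3 : (List.range (k + 1)).map h = h 0 :: ((List.range k).map (fun i => h (i + 1))) := by
    simp [List.range_succ_eq_map, List.map_map, Function.comp, Nat.succ_eq_add_one]
  rw [e1, e2, e3]
  rw [List.map_cons, List.foldl_cons, List.foldl_cons]
  rw [max_self]
  calc ((List.map (fun i => h (i + 1)) (List.range k)).map (· + c)).foldl max (max m (h 0 + c))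
      = max m (((List.map (fun i => h (i + 1)) (List.range k)).map (· + c)).foldl max (h 0 + c)) := by
        rw [List.foldl_assoc]
    _ = max m ((List.map (fun i => h (i + 1)) (List.range k)).foldl max (h 0) + c) := by
        rw [foldl_max_add]

theorem pvB_succ (A : List Int) (n : Nat) :
    pvB A (n + 1) = max (pvB A n) (pvG A n - (n : Int)) := by
  simp [pvB, List.range_succ, List.foldl_append]

theorem pvM_succ (A : List Int) (n : Nat) :
    pvM A (n + 1) = max (pvM A n) (pvB A (n + 1) + pvG A n + (n : Int)) := by
  have e0 : pairsJ (n + 1) = pairsJ n ++ (List.range (n + 1)).map (fun i => (i, n)) := by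
    simp [pairsJ, List.range_succ]
  rw [pvM, e0, List.foldl_append, List.foldl_map]
  have e1 : (fun (m : Int) i => pvF A m (i, n))
      = fun m i => max m ((pvG A i - (i : Int)) + (pvG A n + (n : Int))) := by
    funext m i
    simp only [pvF, pvS]
    ring_nf
  rw [e1, column_fold (fun i => pvG A i - (i : Int)) (pvG A n + (n : Int)) _ n]
  rw [← pvM]
  have e2 : pvB A (n + 1)
      = ((List.range (n + 1)).map (fun i => pvG A i - (i : Int))).foldl max (pvG A 0 - (0 : Nat)) := rfl
  rw [e2]
  push_cast
  ring_nf

theorem B_eq_phi (A : List Int) :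
    solution_alt A = ((List.range A.length).foldl (pvPhi A) (-100, none)).1 := by
  unfold solution_alt
  rw [PySem.List.enumerate_eq_map_pyRange A 0, List.foldl_map, PySem.List.pyRange_one]
  rw [List.foldl_map]
  have hl : (PySem.List.len A - 0).toNat = A.length := by simp [PySem.List.len]
  rw [hl]
  refine congrArg Prod.fst ?_
  refine congrArg (fun f => List.foldl f ((-100 : Int), (none : Option Int)) (List.range A.length)) ?_
  funext st k
  simp [pvPhi, pvG, PySem.List.pyGetD_natCast]

theorem phi_invariant (A : List Int) (n : Nat) (hn : 1 ≤ n) :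
    (List.range n).foldl (pvPhi A) (-100, none) = (pvM A n, some (pvB A n)) := by
  induction n, hn using Nat.le_induction with
  | base =>
    show List.foldl (pvPhi A) (-100, none) (List.range 1) = _
    rw [show List.range 1 = [0] from rfl]
    simp only [List.foldl_cons, List.foldl_nil, pvPhi, pvM, pairsJ, pvB]
    simp only [List.range_one, List.flatMap_cons, List.flatMap_nil, List.map_cons, List.map_nil,
      List.foldl_cons, List.foldl_nil, List.append_nil]
    refine Prod.ext ?_ ?_
    · unfold pvF pvS pvG
      simp [Int.max_def]
      split_ifs <;> omega
    · simp
  | succ n hn ih =>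
    rw [List.range_succ, List.foldl_append, ih, List.foldl_cons, List.foldl_nil]
    simp only [pvPhi]
    have hbest : (if pvG A n - (n : Int) > pvB A n then pvG A n - (n : Int) else pvB A n)
        = pvB A (n + 1) := by
      simp only [gt_iff_lt, if_lt_eq_max, ← pvB_succ]
    refine Prod.ext ?_ ?_
    · simp only [hbest, gt_iff_lt, if_lt_eq_max, pvM_succ]
    · simp only [hbest]

theorem main_eq (A : List Int) : solution A = solution_alt A := by
  rcases Nat.eq_zero_or_pos A.length with h0 | hp
  · rw [A_eq_pvM, B_eq_phi, h0]; rfl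
  · rw [A_eq_pvM, B_eq_phi, phi_invariant A A.length hp]

-- ===== VERDICT (by name: the statement is the Claim_ definition above) =====
theorem solution_spec : Claim_equal_solution := by
  intro A _
  unfold Spec_solution
  exact main_eq A
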